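-- pv_equiv track=rewrite | github.com/timshenkao/interview_coding_exercises | python_code/medium/49_Group_Anagrams_medium/solution.py | _calculate_str_signature
-- ===== SOURCE A (Python) =====
-- def _calculate_str_signature(s: str) -> str:
--     # empty string
--     if not s:
--         return ""
--     # non-empty string
--     temp = dict()
--     # calculate frequencies of a character
--     for i in range(len(s)):
--         _ = temp.setdefault(s[i], 0)
--         temp[s[i]] += 1
--
--     result = list()
--     # signature is a character followed
--     for key in sorted(temp.keys()):
--         result.append(key + str(temp[key]))
--     return "".join(result)
-- ===== SOURCE B (Python) =====
-- from itertools import groupby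
--
-- def _calculate_str_signature(s: str) -> str:
--     return "".join(c + str(len(list(g))) for c, g in groupby(sorted(s)))
-- ===== Notes on version B (the rewrite author's own statement) =====
-- stated objective: idiomatic
-- what changed: Replaced the frequency-dict build plus sorted-keys pass by a sort-then-groupby expression: sort the characters, group equal runs, and emit char+run-length per group.
import Mathlib
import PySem

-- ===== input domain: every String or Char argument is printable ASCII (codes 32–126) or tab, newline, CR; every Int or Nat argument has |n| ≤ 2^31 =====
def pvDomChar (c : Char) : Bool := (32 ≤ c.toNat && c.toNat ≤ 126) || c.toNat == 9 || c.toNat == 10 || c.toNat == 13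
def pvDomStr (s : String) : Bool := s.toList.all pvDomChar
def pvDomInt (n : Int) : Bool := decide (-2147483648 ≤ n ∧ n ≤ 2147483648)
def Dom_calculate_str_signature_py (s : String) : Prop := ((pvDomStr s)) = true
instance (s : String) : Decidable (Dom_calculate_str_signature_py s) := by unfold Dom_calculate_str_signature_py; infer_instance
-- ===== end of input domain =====

-- B replaces A's count-into-dict-then-sort-keys by sort-the-characters-then-group-runs (itertools.groupby); same output, more idiomatic.

-- ===== PORT A =====
def calculate_str_signature_py (s : String) : String :=
  if s.toList = [] then ""
  else
    let temp : PySem.Dict Char Int :=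
      (PySem.List.pyRange 0 (s.toList.length : Int) 1).foldl
        (fun d i =>
          let c := PySem.List.pyGetD s.toList i ' '
          d.insert c (d.getD c 0 + 1))
        PySem.Dict.empty
    let result : List String :=
      (PySem.List.sorted temp.keys (fun k => k) false).foldl
        (fun r k => r ++ [String.mk [k] ++ PySem.Int.toStr (temp.getD k 0)]) []
    PySem.Str.join "" result

-- ===== PORT B =====
-- itertools.groupby over a sorted list: peel the leading run, recurse on the remainder.
def pvRuns : List Char → List (Char × Int)
  | [] => []
  | c :: t =>
    (c, (t.takeWhile (fun y => y == c)).length + 1) :: pvRuns (t.dropWhile (fun y => y == c))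
termination_by l => l.length
decreasing_by
  simp only [List.length_cons]
  exact Nat.lt_succ_of_le (List.length_dropWhile_le _ _)

def calculate_str_signature_py_alt (s : String) : String :=
  PySem.Str.join ""
    ((pvRuns (PySem.List.sorted s.toList (fun c => c) false)).map
      (fun p => String.mk [p.1] ++ PySem.Int.toStr p.2))

-- ===== PRECONDITION & SPEC =====
def Spec_calculate_str_signature_py (s : String) (out : String) : Prop := out = calculate_str_signature_py_alt s
instance (s : String) (out : String) : Decidable (Spec_calculate_str_signature_py s out) := by unfold Spec_calculate_str_signature_py; infer_instance

-- ===== CLAIM (what is proved, stated in full; the proofs are below) =====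
def Claim_equal_calculate_str_signature_py : Prop := ∀ (s : String), Dom_calculate_str_signature_py s → Spec_calculate_str_signature_py s (calculate_str_signature_py s)

-- ===== LEMMAS AND PROOFS =====

-- on a ≤-sorted list with lower bound c, every element of dropWhile (== c) is > c
theorem pv_dropWhile_gt (c : Char) :
    ∀ (t : List Char), t.Pairwise (· ≤ ·) → (∀ x ∈ t, c ≤ x) →
      ∀ x ∈ t.dropWhile (fun y => y == c), c < x := by
  intro t
  induction t with
  | nil => intro _ _ x hx; simp [List.dropWhile] at hx
  | cons a t ih =>
    intro hp hlb x hx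
    rw [List.dropWhile_cons] at hx
    by_cases hac : (a == c) = true
    · rw [if_pos hac] at hx
      exact ih (List.Pairwise.of_cons hp) (fun y hy => hlb y (List.mem_cons_of_mem _ hy)) x hx
    · rw [if_neg hac] at hx
      have hca : c ≤ a := hlb a List.mem_cons_self
      have hne : a ≠ c := by simpa using hac
      have hca' : c < a := lt_of_le_of_ne hca (Ne.symm hne)
      rcases List.mem_cons.mp hx with rfl | hx'
      · exact hca'
      · exact lt_of_lt_of_le hca' ((List.pairwise_cons.mp hp).1 x hx')

theorem pv_takeWhile_count (c : Char) (t : List Char)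
    (h : ∀ x ∈ t.dropWhile (fun y => y == c), c < x) :
    t.count c = (t.takeWhile (fun y => y == c)).length := by
  have hsplit : t = t.takeWhile (fun y => y == c) ++ t.dropWhile (fun y => y == c) :=
    (List.takeWhile_append_dropWhile).symm
  have hdrop : (t.dropWhile (fun y => y == c)).count c = 0 := by
    rw [List.count_eq_zero]
    intro hc
    exact lt_irrefl c (h c hc)
  have htake : (t.takeWhile (fun y => y == c)).count c
      = (t.takeWhile (fun y => y == c)).length := by
    rw [List.count_eq_length]
    intro b hb
    have hb' := List.mem_takeWhile_imp hb
    simp at hb'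
    exact hb'.symm
  conv_lhs => rw [hsplit]
  rw [List.count_append, hdrop, htake]
  omega

-- main characterisation of pvRuns on a ≤-sorted list
theorem pvRuns_spec : ∀ (l : List Char), l.Pairwise (· ≤ ·) →
    ((∀ p ∈ pvRuns l, (p.2 = (l.count p.1 : Int))) ∧
     ((pvRuns l).map Prod.fst).Pairwise (· < ·) ∧
     (∀ x, x ∈ (pvRuns l).map Prod.fst ↔ x ∈ l)) := by
  intro l
  induction l using pvRuns.induct with
  | case1 => intro _; simp [pvRuns]
  | case2 c t ih =>
    intro hp
    have ht : t.Pairwise (· ≤ ·) := List.Pairwise.of_cons hp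
    have hlb : ∀ x ∈ t, c ≤ x := (List.pairwise_cons.mp hp).1
    have hgt : ∀ x ∈ t.dropWhile (fun y => y == c), c < x := pv_dropWhile_gt c t ht hlb
    have hrest : (t.dropWhile (fun y => y == c)).Pairwise (· ≤ ·) :=
      List.Pairwise.sublist (List.dropWhile_sublist _) ht
    have hsplit : t = t.takeWhile (fun y => y == c) ++ t.dropWhile (fun y => y == c) :=
      (List.takeWhile_append_dropWhile).symm
    obtain ⟨ihcnt, ihpw, ihmem⟩ := ih hrest
    refine ⟨?_, ?_, ?_⟩
    · intro p hp'
      rw [pvRuns] at hp'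
      rcases List.mem_cons.mp hp' with rfl | hp''
      · have hcount : (c :: t).count c = (t.takeWhile (fun y => y == c)).length + 1 := by
          rw [List.count_cons_self, pv_takeWhile_count c t hgt]
        simp only []
        rw [hcount]; push_cast; ring
      · have h1 := ihcnt p hp''
        have hpfst : p.1 ∈ t.dropWhile (fun y => y == c) :=
          (ihmem p.1).mp (List.mem_map_of_mem hp'')
        have hne : p.1 ≠ c := fun h => lt_irrefl c (h ▸ hgt p.1 hpfst)
        have htk : (t.takeWhile (fun y => y == c)).count p.1 = 0 := by
          rw [List.count_eq_zero]
          intro hmem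
          have h' := List.mem_takeWhile_imp hmem
          simp at h'
          exact hne h'
        have hcc : (c :: t).count p.1 = (t.dropWhile (fun y => y == c)).count p.1 := by
          rw [List.count_cons_of_ne (Ne.symm hne)]
          conv_lhs => rw [hsplit]
          rw [List.count_append, htk]
          ring
        rw [h1, hcc]
    · rw [pvRuns]
      simp only [List.map_cons]
      rw [List.pairwise_cons]
      exact ⟨fun x hx => hgt x ((ihmem x).mp hx), ihpw⟩
    · intro x
      rw [pvRuns]
      simp only [List.map_cons, List.mem_cons, ihmem]
      constructor
      · rintro (rfl | hx)
        · exact Or.inl rfl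
        · refine Or.inr ?_
          rw [hsplit]
          exact List.mem_append_right _ hx
      · rintro (rfl | hx)
        · exact Or.inl rfl
        · by_cases hxc : x = c
          · exact Or.inl hxc
          · refine Or.inr ?_
            rw [hsplit] at hx
            rcases List.mem_append.mp hx with h | h
            · have h' := List.mem_takeWhile_imp h
              simp at h'
              exact absurd h' hxc
            · exact h

-- pvRuns of sorted l equals the sorted distinct chars paired with their counts in l
theorem pvRuns_sorted_eq (l : List Char) :
    pvRuns (PySem.List.sorted l (fun c => c) false)
      = (PySem.List.sorted (PySem.Set.ofList l) (fun k => k) false).map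
          (fun k => (k, (l.count k : Int))) := by
  set sl := PySem.List.sorted l (fun c => c) false with hsl
  have hperm : sl.Perm l := by rw [hsl]; exact PySem.List.sorted_perm _ _ _
  have hpw : sl.Pairwise (· ≤ ·) := by
    rw [hsl]
    have := PySem.List.sorted_pairwise (xs := l) (key := fun c => c)
    simpa using this
  obtain ⟨hcnt, hfstpw, hfstmem⟩ := pvRuns_spec sl hpw
  have hks : PySem.List.sorted (PySem.Set.ofList l) (fun k => k) false
      = (pvRuns sl).map Prod.fst := by
    apply PySem.List.sorted_eq_of_perm_of_pairwise_lt
    · rw [List.perm_ext_iff_of_nodup hfstpw.nodup (PySem.Set.nodup_ofList l)]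
      intro x
      rw [hfstmem, PySem.Set.mem_ofList, hperm.mem_iff]
    · simpa using hfstpw
  rw [hks, List.map_map]
  apply List.ext_getElem (by simp)
  intro i h1 h2
  simp only [List.getElem_map, Function.comp]
  have hm : (pvRuns sl)[i] ∈ pvRuns sl := List.getElem_mem _
  have h2' := hcnt _ hm
  rw [hperm.count_eq] at h2'
  rw [← h2']

-- ===== VERDICT (by name: the statement is the Claim_ definition above) =====
theorem calculate_str_signature_py_spec : Claim_equal_calculate_str_signature_py := by
  intro s _
  unfold Spec_calculate_str_signature_py calculate_str_signature_py calculate_str_signature_py_alt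
  by_cases hnil : s.toList = []
  · rw [if_pos hnil, hnil]
    have h0 : PySem.List.sorted ([] : List Char) (fun c => c) false = [] := rfl
    simp [h0, pvRuns, PySem.Str.join, PySem.Chars.join, List.intercalate]
  · rw [if_neg hnil]
    simp only []
    have hdict := PySem.List.foldl_pyRange_pyGetD' (xs := s.toList) (d := ' ')
      (f := fun (d : PySem.Dict Char Int) c => d.insert c (d.getD c 0 + 1))
      (init := PySem.Dict.empty) (a := 0) (by norm_num)
    simp only [Int.toNat_zero, List.drop_zero,
      PySem.Dict.foldl_insert_getD_add_one_eq_counter] at hdict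
    simp only [hdict]
    rw [PySem.List.foldl_append_singleton_eq_map, List.nil_append]
    congr 1
    rw [PySem.Dict.keys_counter, pvRuns_sorted_eq, List.map_map]
    apply List.map_congr_left
    intro k _
    simp [PySem.Dict.getD_counter]
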